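-- pv_equiv track=rewrite | github.com/IlianTheOne0/Algorithms_and_lists | func.py | is_negative_and_positive
-- ===== SOURCE A (Python) =====
-- def is_negative_and_positive(numbers) -> tuple:
--     number_of_negative = 0
--     negative_numbers = list()
--     number_of_positive = 0
--     positive_numbers = list()
--     number_of_zero = 0
--
--     for digit in range(len(numbers)):
--         if numbers[digit] < 0:
--             number_of_negative += 1
--             negative_numbers.append(numbers[digit])
--         elif numbers[digit] != 0:
--             number_of_positive += 1
--             positive_numbers.append(numbers[digit])
--         else:
--             number_of_zero += 1
--
--     return number_of_negative, negative_numbers, number_of_positive, positive_numbers, number_of_zero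
-- ===== SOURCE B (Python) =====
-- def is_negative_and_positive(numbers) -> tuple:
--     negative_numbers = [x for x in numbers if x < 0]
--     positive_numbers = [x for x in numbers if not (x < 0) and x != 0]
--     return (len(negative_numbers), negative_numbers,
--             len(positive_numbers), positive_numbers,
--             len(numbers) - len(negative_numbers) - len(positive_numbers))
-- ===== Notes on version B (the rewrite author's own statement) =====
-- stated objective: simpler
-- what changed: Replaces the single index-driven loop with five accumulators by two filter comprehensions over the elements, and derives the zero count arithmetically as len(numbers) minus the two filtered lengths instead of counting zeros in the loop.
import Mathlib
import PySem

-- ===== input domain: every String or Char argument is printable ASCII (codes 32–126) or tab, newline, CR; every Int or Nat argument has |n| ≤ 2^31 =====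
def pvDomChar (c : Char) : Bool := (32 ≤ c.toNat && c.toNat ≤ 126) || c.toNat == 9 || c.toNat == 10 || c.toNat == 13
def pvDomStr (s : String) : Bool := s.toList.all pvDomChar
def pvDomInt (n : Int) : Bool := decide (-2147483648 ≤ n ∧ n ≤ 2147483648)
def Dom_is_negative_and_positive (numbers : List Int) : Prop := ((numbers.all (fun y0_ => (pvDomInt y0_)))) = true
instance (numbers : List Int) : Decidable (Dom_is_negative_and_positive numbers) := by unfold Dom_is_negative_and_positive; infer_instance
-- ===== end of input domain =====

-- B replaces A's index-driven five-accumulator loop by two filters plus an arithmetic zero count (objective: simpler).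

-- ===== PORT A =====
def is_negative_and_positive (numbers : List Int) : Int × List Int × Int × List Int × Int :=
  (PySem.List.pyRange 0 numbers.length 1).foldl
    (fun (acc : Int × List Int × Int × List Int × Int) digit =>
      if PySem.List.pyGetD numbers digit 0 < 0 then
        (acc.1 + 1, acc.2.1 ++ [PySem.List.pyGetD numbers digit 0], acc.2.2.1, acc.2.2.2.1, acc.2.2.2.2)
      else if PySem.List.pyGetD numbers digit 0 ≠ 0 then
        (acc.1, acc.2.1, acc.2.2.1 + 1, acc.2.2.2.1 ++ [PySem.List.pyGetD numbers digit 0], acc.2.2.2.2)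
      else (acc.1, acc.2.1, acc.2.2.1, acc.2.2.2.1, acc.2.2.2.2 + 1))
    (0, [], 0, [], 0)

-- ===== PORT B =====
def is_negative_and_positive_alt (numbers : List Int) : Int × List Int × Int × List Int × Int :=
  let negative_numbers := numbers.filter (fun x => x < 0)
  let positive_numbers := numbers.filter (fun x => !(x < 0) && x ≠ 0)
  ((negative_numbers.length : Int), negative_numbers,
   (positive_numbers.length : Int), positive_numbers,
   (numbers.length : Int) - negative_numbers.length - positive_numbers.length)

-- ===== PRECONDITION & SPEC =====
def Spec_is_negative_and_positive (numbers : List Int) (out : Int × List Int × Int × List Int × Int) : Prop := out = is_negative_and_positive_alt numbers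
instance (numbers : List Int) (out : Int × List Int × Int × List Int × Int) : Decidable (Spec_is_negative_and_positive numbers out) := by unfold Spec_is_negative_and_positive; infer_instance

-- ===== CLAIM (what is proved, stated in full; the proofs are below) =====
def Claim_equal_is_negative_and_positive : Prop := ∀ (numbers : List Int), Dom_is_negative_and_positive numbers → Spec_is_negative_and_positive numbers (is_negative_and_positive numbers)

-- ===== LEMMAS AND PROOFS =====

lemma inp_loop (xs : List Int) (nn np nz : Int) (negs poss : List Int) :
    xs.foldl
      (fun (acc : Int × List Int × Int × List Int × Int) (x : Int) =>
        if x < 0 then (acc.1 + 1, acc.2.1 ++ [x], acc.2.2.1, acc.2.2.2.1, acc.2.2.2.2)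
        else if x ≠ 0 then (acc.1, acc.2.1, acc.2.2.1 + 1, acc.2.2.2.1 ++ [x], acc.2.2.2.2)
        else (acc.1, acc.2.1, acc.2.2.1, acc.2.2.2.1, acc.2.2.2.2 + 1))
      (nn, negs, np, poss, nz)
    = (nn + (xs.filter (fun x => x < 0)).length,
       negs ++ xs.filter (fun x => x < 0),
       np + (xs.filter (fun x => !(x < 0) && x ≠ 0)).length,
       poss ++ xs.filter (fun x => !(x < 0) && x ≠ 0),
       nz + ((xs.length : Int)
              - (xs.filter (fun x => x < 0)).length
              - (xs.filter (fun x => !(x < 0) && x ≠ 0)).length)) := by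
  induction xs generalizing nn np nz negs poss with
  | nil => simp
  | cons x xs ih =>
    simp only [List.foldl_cons]
    by_cases h1 : x < 0
    · rw [if_pos h1, ih]
      simp [List.filter, h1]
      ring
    · by_cases h2 : x = 0
      · rw [if_neg h1]
        simp only [h2, ne_eq, not_true_eq_false, if_false, ih]
        simp [List.filter]
        ring
      · rw [if_neg h1, if_pos h2, ih]
        simp [List.filter, h1, h2]
        refine ⟨by ring, by push_cast; ring⟩

-- ===== VERDICT (by name: the statement is the Claim_ definition above) =====
theorem is_negative_and_positive_spec : Claim_equal_is_negative_and_positive := by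
  intro numbers _
  unfold Spec_is_negative_and_positive is_negative_and_positive is_negative_and_positive_alt
  have hf := PySem.List.foldl_pyRange_pyGetD' (a := 0) (xs := numbers) (d := 0)
    (f := fun (acc : Int × List Int × Int × List Int × Int) (x : Int) =>
      if x < 0 then (acc.1 + 1, acc.2.1 ++ [x], acc.2.2.1, acc.2.2.2.1, acc.2.2.2.2)
      else if x ≠ 0 then (acc.1, acc.2.1, acc.2.2.1 + 1, acc.2.2.2.1 ++ [x], acc.2.2.2.2)
      else (acc.1, acc.2.1, acc.2.2.1, acc.2.2.2.1, acc.2.2.2.2 + 1))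
    (init := (0, [], 0, [], 0)) (by norm_num)
  simp only [Int.toNat_zero, List.drop_zero] at hf
  rw [hf, inp_loop]
  simp
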